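-- pv_equiv track=rewrite | github.com/SENG499-Company-4/Algorithm-1 | scripts/gotopyapi.py | py_type
-- ===== SOURCE A (Python) =====
-- def py_type(go_type):
--     """Takes a Go type and returns an equivalent Python type"""
--
--     if go_type[:2] == "[]":
--         return f"list[{py_type(go_type[2:])}]"
--
--     if go_type == "uint":
--         return "int"
--
--     if go_type == "string":
--         return "str"
--
--     if go_type == "float32":
--         return "float"
--
--     return go_type
-- ===== SOURCE B (Python) =====
-- def py_type(go_type):
--     """Takes a Go type and returns an equivalent Python type"""
--     d = 0
--     while go_type.startswith("[]"):
--         d += 1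
--         go_type = go_type[2:]
--     base = {"uint": "int", "string": "str", "float32": "float"}.get(go_type, go_type)
--     return "list[" * d + base + "]" * d
-- ===== Notes on version B (the rewrite author's own statement) =====
-- stated objective: simpler
-- what changed: Replaced the recursion over list-bracket prefixes by a single loop that counts nesting depth, a dict lookup for the base type, and string repetition to rebuild the wrappers.
import Mathlib
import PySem

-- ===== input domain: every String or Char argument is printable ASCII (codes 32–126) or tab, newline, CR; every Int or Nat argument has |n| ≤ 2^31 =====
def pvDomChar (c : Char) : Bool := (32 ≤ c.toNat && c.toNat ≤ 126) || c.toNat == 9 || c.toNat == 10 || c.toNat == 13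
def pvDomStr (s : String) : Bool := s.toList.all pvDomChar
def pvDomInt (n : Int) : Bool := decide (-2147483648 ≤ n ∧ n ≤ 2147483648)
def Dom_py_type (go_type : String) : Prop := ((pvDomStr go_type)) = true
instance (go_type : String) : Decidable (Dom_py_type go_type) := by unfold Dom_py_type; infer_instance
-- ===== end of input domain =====

-- B replaces A's recursion over '[]'-prefixes by one depth-counting loop, a dict lookup and string repetition (simpler).

-- ===== PORT A =====
-- lemma the port cites for termination
theorem pvSliceTwoLen (s : List Char) (h : PySem.List.slice s (some 0) (some 2) = ['[', ']']) :
    (PySem.List.slice s (some 2) none).length < s.length := by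
  have h2 : PySem.List.slice s (some 0) (some 2) = s.take 2 := by simp [pysem]
  have hlen : s.take 2 = ['[', ']'] := h2 ▸ h
  have : (s.take 2).length = 2 := by rw [hlen]; rfl
  have hd : PySem.List.slice s (some 2) none = s.drop 2 := by simp [pysem]
  rw [hd]
  simp at this ⊢
  omega

-- recursion on the string's character list; each step strips the leading "[]" exactly as A does
def pyTypeAux (s : List Char) : List Char :=
  if h : PySem.List.slice s (some 0) (some 2) = ['[', ']'] then
    "list[".toList ++ pyTypeAux (PySem.List.slice s (some 2) none) ++ [']']
  else if s = "uint".toList then "int".toList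
  else if s = "string".toList then "str".toList
  else if s = "float32".toList then "float".toList
  else s
termination_by s.length
decreasing_by exact pvSliceTwoLen s h

def py_type (go_type : String) : String := String.ofList (pyTypeAux go_type.toList)

-- ===== PORT B =====
-- the while loop: strip a leading "[]" while counting the depth
def stripDepth : List Char → Nat × List Char
  | '[' :: ']' :: rest => let p := stripDepth rest; (p.1 + 1, p.2)
  | s => (0, s)

def goToPyMap : PySem.Dict String String :=
  PySem.Dict.ofList [("uint", "int"), ("string", "str"), ("float32", "float")]

def py_type_alt (go_type : String) : String :=
  let p := stripDepth go_type.toList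
  let base := PySem.Dict.getD goToPyMap (String.ofList p.2) (String.ofList p.2)
  String.ofList (PySem.List.pyRepeat "list[".toList (p.1 : Int) ++ base.toList
      ++ PySem.List.pyRepeat [']'] (p.1 : Int))

-- ===== PRECONDITION & SPEC =====
def Spec_py_type (go_type : String) (out : String) : Prop := out = py_type_alt go_type
instance (go_type : String) (out : String) : Decidable (Spec_py_type go_type out) := by unfold Spec_py_type; infer_instance

-- ===== CLAIM (what is proved, stated in full; the proofs are below) =====
def Claim_equal_py_type : Prop := ∀ (go_type : String), Dom_py_type go_type → Spec_py_type go_type (py_type go_type)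

-- ===== LEMMAS AND PROOFS =====

theorem take2_shape (s : List Char) (h : s.take 2 = ['[', ']']) : s = '[' :: ']' :: s.drop 2 := by
  cases s with
  | nil => simp at h
  | cons a t =>
    cases t with
    | nil => simp at h
    | cons b r =>
      simp only [List.take, List.cons.injEq] at h
      obtain ⟨rfl, rfl, -⟩ := h
      simp

theorem stripDepth_cons (r : List Char) : stripDepth ('[' :: ']' :: r) = ((stripDepth r).1 + 1, (stripDepth r).2) := by
  rfl

theorem stripDepth_of_no_prefix (s : List Char) (h : ¬ s.take 2 = ['[', ']']) : stripDepth s = (0, s) := by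
  rw [stripDepth.eq_def]
  split
  · simp at h
  · rfl

theorem pyRepeat_succ {α : Type} (xs : List α) (n : Nat) :
    PySem.List.pyRepeat xs ((n + 1 : Nat) : Int) = xs ++ PySem.List.pyRepeat xs (n : Int) := by
  simp [PySem.List.pyRepeat, List.replicate_succ]

theorem getD_goToPyMap (t : String) (h1 : t ≠ "uint") (h2 : t ≠ "string") (h3 : t ≠ "float32") :
    PySem.Dict.getD goToPyMap t t = t := by
  simp [goToPyMap, PySem.Dict.ofList, PySem.Dict.update, PySem.Dict.getD_insert, h1, h2, h3]

theorem pyTypeAux_eq (s : List Char) :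
    pyTypeAux s = PySem.List.pyRepeat "list[".toList (((stripDepth s).1 : Nat) : Int)
      ++ (PySem.Dict.getD goToPyMap (String.ofList (stripDepth s).2) (String.ofList (stripDepth s).2)).toList
      ++ PySem.List.pyRepeat [']'] (((stripDepth s).1 : Nat) : Int) := by
  fun_induction pyTypeAux s with
  | case1 s h ih =>
    have htake : s.take 2 = ['[', ']'] := by
      have h2 : PySem.List.slice s (some 0) (some 2) = s.take 2 := by simp [pysem]
      exact h2 ▸ h
    have hshape := take2_shape s htake
    have hd : PySem.List.slice s (some 2) none = s.drop 2 := by simp [pysem]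
    rw [hd] at ih ⊢
    rw [ih]
    conv_rhs => rw [hshape, stripDepth_cons]
    rw [pyRepeat_succ, pyRepeat_succ]
    simp [PySem.List.pyRepeat_singleton]
    rw [← List.replicate_succ', List.replicate_succ]
  | case2 h1 => decide
  | case3 h1 h2 => decide
  | case4 h1 h2 h3 => decide
  | case5 s h h1 h2 h3 =>
    have htake : ¬ s.take 2 = ['[', ']'] := by
      intro ht
      exact h (by simpa [pysem] using ht)
    rw [stripDepth_of_no_prefix s htake]
    simp [PySem.List.pyRepeat]
    rw [getD_goToPyMap]
    · simp
    all_goals (intro he; apply_fun String.toList at he; simp at he)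
    · exact h1 he
    · exact h2 he
    · exact h3 he

-- ===== VERDICT (by name: the statement is the Claim_ definition above) =====
theorem py_type_spec : Claim_equal_py_type := by
  intro s _
  unfold Spec_py_type py_type py_type_alt
  rw [pyTypeAux_eq]
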